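-- pv_equiv track=rewrite | github.com/ProITScrape/python-test | first_part/src.py | exercise_two
-- ===== SOURCE A (Python) =====
-- import operator
-- import functools
--
-- def  exercise_two(number):
--         l = [int(x) for x in str(number)]
--         k = []
--         for i,x in enumerate(l):
--             if i<len(l)-1:
--                 r=[x,l[i+1]]
--                 product = functools.reduce(operator.mul,r)
--                 k.append(product)
--         k.append(functools.reduce(operator.mul,l))
--         result = l+k
--         if len(set(result)) != len(result):
--             return False
--         return True
-- ===== SOURCE B (Python) =====
-- def exercise_two(number):
--     digits = [int(ch) for ch in str(number)]
--     derived = list(digits)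
--     total = digits[0]
--     for prev, cur in zip(digits, digits[1:]):
--         derived.append(prev * cur)
--         total *= cur
--     derived.append(total)
--     derived.sort()
--     return all(a != b for a, b in zip(derived, derived[1:]))
-- ===== Notes on version B (the rewrite author's own statement) =====
-- stated objective: alternative
-- what changed: One accumulator pass over adjacent digit pairs builds the pair products and the running total product together (instead of an enumerate/index loop plus a separate reduce), and duplicates are detected by sorting the derived list and scanning for equal neighbours instead of comparing set size to list length.
import Mathlib
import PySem

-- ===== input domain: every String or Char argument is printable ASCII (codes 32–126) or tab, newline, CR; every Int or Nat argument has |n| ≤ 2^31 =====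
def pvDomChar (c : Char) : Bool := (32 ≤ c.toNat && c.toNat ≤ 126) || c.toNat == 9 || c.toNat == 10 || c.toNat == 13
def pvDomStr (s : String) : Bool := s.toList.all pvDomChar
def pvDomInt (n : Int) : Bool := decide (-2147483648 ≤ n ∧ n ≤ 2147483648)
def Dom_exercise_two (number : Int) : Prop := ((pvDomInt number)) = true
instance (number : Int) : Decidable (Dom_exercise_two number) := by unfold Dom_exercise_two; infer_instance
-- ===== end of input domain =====

-- B builds pair products and the total product in one accumulator pass over adjacent pairs and
-- detects duplicates by sorting the derived list and scanning for equal neighbours (alternative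
-- decomposition; A compares set size to list length after an enumerate/index loop plus reduce).


-- ===== PORT A =====
-- functools.reduce(operator.mul, xs); Python raises TypeError on an empty list — that case is
-- unreachable here (str(number) is never empty), the 0 is a placeholder for it.
def pyReduceMul (xs : List Int) : Int :=
  match xs with
  | [] => 0
  | h :: t => t.foldl (· * ·) h

def exercise_two (number : Int) : Bool :=
  let l : List Int := (PySem.Int.toChars number).map (fun c => (PySem.Int.ofChars? [c]).getD 0)
  let k : List Int := (PySem.List.enumerate l).foldl
    (fun k ix =>
      if ix.1 < (l.length : Int) - 1 then
        let r := [ix.2, PySem.List.pyGetD l (ix.1 + 1) 0]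
        let product := pyReduceMul r
        k ++ [product]
      else k) []
  let k := k ++ [pyReduceMul l]
  let result := l ++ k
  if (PySem.Set.ofList result).length ≠ result.length then false else true

-- ===== PORT B =====
def exercise_two_alt (number : Int) : Bool :=
  let digits : List Int := (PySem.Int.toChars number).map (fun c => (PySem.Int.ofChars? [c]).getD 0)
  match digits with
  | [] => true  -- unreachable (str(number) is never empty; Python digits[0] would raise there)
  | d0 :: rest =>
    let st := (digits.zip rest).foldl
        (fun (st : List Int × Int) p => (st.1 ++ [p.1 * p.2], st.2 * p.2)) (digits, d0)
    let derived := st.1 ++ [st.2]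
    let sortedD := PySem.List.sorted derived (fun x => x) false
    (sortedD.zip sortedD.tail).all (fun p => !(p.1 == p.2))

-- ===== PRECONDITION & SPEC =====
-- Pre_ excludes negative numbers: there str(number) starts with '-' and int('-') raises
-- ValueError in A (and in B alike), so A returns no value.
def Pre_exercise_two (number : Int) : Prop := 0 ≤ number
instance (number : Int) : Decidable (Pre_exercise_two number) := by unfold Pre_exercise_two; infer_instance
def pvWitness_exercise_two : Int := (263)

def Spec_exercise_two (number : Int) (out : Bool) : Prop := out = exercise_two_alt number
instance (number : Int) (out : Bool) : Decidable (Spec_exercise_two number out) := by unfold Spec_exercise_two; infer_instance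

-- ===== CLAIM (what is proved, stated in full; the proofs are below) =====
def Claim_equal_exercise_two : Prop := ∀ (number : Int), Dom_exercise_two number → Pre_exercise_two number → Spec_exercise_two number (exercise_two number)

-- ===== LEMMAS AND PROOFS =====

-- A's enumerate/index pair loop produces exactly the adjacent-pair products.
theorem loopA (suf : List Int) : ∀ (pre acc : List Int),
    (PySem.List.enumerate suf (pre.length : Int)).foldl
      (fun k ix => if ix.1 < ((pre ++ suf).length : Int) - 1 then
          k ++ [pyReduceMul [ix.2, PySem.List.pyGetD (pre ++ suf) (ix.1 + 1) 0]] else k) acc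
    = acc ++ (suf.zip suf.tail).map (fun p => p.1 * p.2) := by
  induction suf with
  | nil => intro pre acc; simp [PySem.List.enumerate]
  | cons x suf' ih =>
    intro pre acc
    rw [PySem.List.enumerate_cons]
    cases suf' with
    | nil =>
      simp [PySem.List.enumerate]
    | cons y rest =>
      have hc : (pre.length : Int) < ((pre ++ x :: y :: rest).length : Int) - 1 := by
        simp; omega
      have hget : PySem.List.pyGetD (pre ++ x :: y :: rest) ((pre.length : Int) + 1) 0 = y := by
        have h1 : ((pre.length : Int) + 1) = ((pre.length + 1 : Nat) : Int) := by push_cast; ring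
        rw [h1, PySem.List.pyGetD_natCast, List.getD_eq_getElem?_getD,
          List.getElem?_append_right (by omega)]
        simp
      have hpre : ((pre ++ [x]).length : Int) = (pre.length : Int) + 1 := by simp
      have happ : (pre ++ [x]) ++ (y :: rest) = pre ++ x :: y :: rest := by simp
      have := ih (pre ++ [x]) (acc ++ [pyReduceMul [x, y]])
      rw [hpre, happ] at this
      simp only [List.foldl_cons, if_pos hc, hget, this]
      simp [pyReduceMul]

-- B's accumulator loop, split into its two components.
theorem loopB (ps : List (Int × Int)) : ∀ (acc1 : List Int) (t : Int),
    ps.foldl (fun (st : List Int × Int) p => (st.1 ++ [p.1 * p.2], st.2 * p.2)) (acc1, t)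
    = (acc1 ++ ps.map (fun p => p.1 * p.2), ps.foldl (fun a p => a * p.2) t) := by
  induction ps with
  | nil => intro acc1 t; simp
  | cons p ps ih => intro acc1 t; simp [ih]

-- the adjacent-scan Bool is the IsChain (·≠·) predicate
theorem allZip_ne (xs : List Int) :
    ((xs.zip xs.tail).all (fun p => !(p.1 == p.2))) = decide (List.IsChain (· ≠ ·) xs) := by
  induction xs with
  | nil => simp
  | cons x t ih =>
    cases t with
    | nil => simp
    | cons y u =>
      simp only [List.tail_cons, List.zip_cons_cons, List.all_cons] at *
      simp [List.isChain_cons_cons, ← ih]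
      tauto

theorem isChain_lt_of_le_ne (xs : List Int)
    (h1 : List.IsChain (· ≤ ·) xs) (h2 : List.IsChain (· ≠ ·) xs) :
    List.IsChain (· < ·) xs := by
  induction xs with
  | nil => simp
  | cons x t ih =>
    cases t with
    | nil => simp
    | cons y u =>
      rw [List.isChain_cons_cons] at *
      exact ⟨lt_of_le_of_ne h1.1 h2.1, ih h1.2 h2.2⟩

-- set-size test = Nodup
theorem setLen_eq_iff_nodup (r : List Int) :
    (PySem.Set.ofList r).length = r.length ↔ r.Nodup := by
  constructor
  · intro h
    have hsub : PySem.Set.ofList r ⊆ r := fun x hx => (PySem.Set.mem_ofList r x).1 hx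
    have hperm : (PySem.Set.ofList r).Perm r :=
      (List.Nodup.subperm (PySem.Set.nodup_ofList r) hsub).perm_of_length_le (le_of_eq h.symm)
    exact hperm.nodup (PySem.Set.nodup_ofList r)
  · intro h
    rw [PySem.Set.ofList_eq_self_of_nodup r h]

-- Nodup = no equal neighbours after sorting
theorem nodup_iff_chain_sorted (r : List Int) :
    r.Nodup ↔ List.IsChain (· ≠ ·) (PySem.List.sorted r (fun x => x) false) := by
  have hperm : (PySem.List.sorted r (fun x => x) false).Perm r := PySem.List.sorted_perm r _ _
  constructor
  · intro h
    exact List.Pairwise.isChain (hperm.symm.nodup h)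
  · intro h
    have hle : List.IsChain (· ≤ ·) (PySem.List.sorted r (fun x => x) false) :=
      List.Pairwise.isChain (PySem.List.sorted_pairwise r _)
    have hlt := (isChain_lt_of_le_ne _ hle h).pairwise
    exact hperm.nodup (hlt.imp ne_of_lt)

-- the two ports agree for every digit list computed from the input
theorem key (l : List Int) :
    (let k : List Int := (PySem.List.enumerate l).foldl
        (fun k ix =>
          if ix.1 < (l.length : Int) - 1 then
            k ++ [pyReduceMul [ix.2, PySem.List.pyGetD l (ix.1 + 1) 0]]
          else k) []
     let k := k ++ [pyReduceMul l]
     let result := l ++ k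
     if (PySem.Set.ofList result).length ≠ result.length then false else true)
    = (match l with
       | [] => true
       | d0 :: rest =>
         let st := (l.zip rest).foldl
             (fun (st : List Int × Int) p => (st.1 ++ [p.1 * p.2], st.2 * p.2)) (l, d0)
         let derived := st.1 ++ [st.2]
         let sortedD := PySem.List.sorted derived (fun x => x) false
         (sortedD.zip sortedD.tail).all (fun p => !(p.1 == p.2))) := by
  cases l with
  | nil => decide
  | cons d0 rest =>
    have hA := loopA (d0 :: rest) [] []
    simp only [List.length_nil, Nat.cast_zero, List.nil_append] at hA
    have hB := loopB ((d0 :: rest).zip rest) (d0 :: rest) d0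
    have htail : (d0 :: rest).tail = rest := rfl
    -- B's running total is reduce(mul, l)
    have htot : ((d0 :: rest).zip rest).foldl (fun a p => a * p.2) d0 = pyReduceMul (d0 :: rest) := by
      have hsnd : ((d0 :: rest).zip rest).map Prod.snd = rest :=
        List.map_snd_zip (by simp)
      calc ((d0 :: rest).zip rest).foldl (fun a p => a * p.2) d0
          = (((d0 :: rest).zip rest).map Prod.snd).foldl (· * ·) d0 := by
            rw [List.foldl_map]
        _ = rest.foldl (· * ·) d0 := by rw [hsnd]
        _ = pyReduceMul (d0 :: rest) := rfl
    simp only [htail] at hA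
    simp only [hA, hB, htot]
    set pairs := ((d0 :: rest).zip rest).map (fun p => p.1 * p.2) with hp
    have hr : (d0 :: rest) ++ (pairs ++ [pyReduceMul (d0 :: rest)])
        = ((d0 :: rest) ++ pairs) ++ [pyReduceMul (d0 :: rest)] := by simp
    simp only [hr]
    set r := ((d0 :: rest) ++ pairs) ++ [pyReduceMul (d0 :: rest)] with hrdef
    rw [allZip_ne]
    by_cases h : (PySem.Set.ofList r).length = r.length
    · have := (nodup_iff_chain_sorted r).1 ((setLen_eq_iff_nodup r).1 h)
      simp [h, this]
    · have : ¬ List.IsChain (· ≠ ·) (PySem.List.sorted r (fun x => x) false) := by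
        intro hc
        exact h ((setLen_eq_iff_nodup r).2 ((nodup_iff_chain_sorted r).2 hc))
      simp [h, this]

-- ===== VERDICT (by name: the statement is the Claim_ definition above) =====
theorem exercise_two_spec : Claim_equal_exercise_two := by
  intro number _ _
  unfold Spec_exercise_two exercise_two exercise_two_alt
  exact key _
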